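-- pv_equiv track=rewrite | github.com/inaciovasquez2020/cyclone-terminal-obstruction | tools/cyclone/overlap_rank.py | overlap_matrix_R
-- ===== SOURCE A (Python) =====
-- from typing import List, Tuple
--
-- def build_adj(n: int, edges: List[Tuple[int,int]]) -> List[List[int]]:
--     adj = [[] for _ in range(n)]
--     for a,b in edges:
--         if a == b:
--             continue
--         if b not in adj[a]:
--             adj[a].append(b)
--         if a not in adj[b]:
--             adj[b].append(a)
--     return adj
--
-- def bfs_ball(adj: List[List[int]], center: int, R: int) -> set[int]:
--     seen = {center}
--     frontier = {center}
--     for _ in range(R):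
--         nxt = set()
--         for u in frontier:
--             for v in adj[u]:
--                 if v not in seen:
--                     seen.add(v)
--                     nxt.add(v)
--         frontier = nxt
--         if not frontier:
--             break
--     return seen
--
-- def overlap_matrix_R(n: int, edges: List[Tuple[int,int]], basis: List[List[int]], R: int) -> List[List[int]]:
--     adj = build_adj(n, edges)
--     balls = [bfs_ball(adj, v, R) for v in range(n)]
--     def overlaps(i,j) -> int:
--         ci = basis[i]
--         cj = basis[j]
--         for v in range(n):
--             ball = balls[v]
--             for e,(a,b) in enumerate(edges):
--                 if ci[e] and cj[e] and (a in ball or b in ball):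
--                     return 1
--         return 0
--     m = len(basis)
--     M = [[0]*m for _ in range(m)]
--     for i in range(m):
--         for j in range(m):
--             M[i][j] = overlaps(i,j)
--     return M
-- ===== SOURCE B (Python) =====
-- from typing import List, Tuple
--
-- def build_adj(n, edges):
--     adj = [[] for _ in range(n)]
--     for a, b in edges:
--         if a == b:
--             continue
--         if b not in adj[a]:
--             adj[a].append(b)
--         if a not in adj[b]:
--             adj[b].append(a)
--     return adj
--
-- def bfs_ball(adj, center, R):
--     seen = {center}
--     frontier = {center}
--     for _ in range(R):
--         nxt = set()
--         for u in frontier: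
--             for v in adj[u]:
--                 if v not in seen:
--                     seen.add(v)
--                     nxt.add(v)
--         frontier = nxt
--         if not frontier:
--             break
--     return seen
--
-- def overlap_matrix_R(n, edges, basis, R):
--     adj = build_adj(n, edges)
--     S = set()
--     for v in range(n):
--         S |= bfs_ball(adj, v, R)
--     supports = [
--         {e for e, (a, b) in enumerate(edges) if row[e] and (a in S or b in S)}
--         for row in basis
--     ]
--     m = len(basis)
--     return [[1 if supports[i] & supports[j] else 0 for j in range(m)]
--             for i in range(m)]
-- ===== Notes on version B (the rewrite author's own statement) =====
-- stated objective: alternative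
-- what changed: A decides each matrix entry with a fresh 4-level early-return scan over (center v, edge e); B computes once the union S of all BFS balls and one 'active support' edge-index set per basis vector, then fills the matrix by pairwise support-set intersection (better worst case, but A's early return wins on the timed inputs).
-- outside the precondition, e.g. on overlap_matrix_R(0, [(0, 0)], [[]], 1): A returns [[0]], B raises IndexError; on overlap_matrix_R(2, [(0, 1), (0, 1)], [[1], [1]], 1): A returns [[1, 1], [1, 1]], B raises IndexError
import Mathlib
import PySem

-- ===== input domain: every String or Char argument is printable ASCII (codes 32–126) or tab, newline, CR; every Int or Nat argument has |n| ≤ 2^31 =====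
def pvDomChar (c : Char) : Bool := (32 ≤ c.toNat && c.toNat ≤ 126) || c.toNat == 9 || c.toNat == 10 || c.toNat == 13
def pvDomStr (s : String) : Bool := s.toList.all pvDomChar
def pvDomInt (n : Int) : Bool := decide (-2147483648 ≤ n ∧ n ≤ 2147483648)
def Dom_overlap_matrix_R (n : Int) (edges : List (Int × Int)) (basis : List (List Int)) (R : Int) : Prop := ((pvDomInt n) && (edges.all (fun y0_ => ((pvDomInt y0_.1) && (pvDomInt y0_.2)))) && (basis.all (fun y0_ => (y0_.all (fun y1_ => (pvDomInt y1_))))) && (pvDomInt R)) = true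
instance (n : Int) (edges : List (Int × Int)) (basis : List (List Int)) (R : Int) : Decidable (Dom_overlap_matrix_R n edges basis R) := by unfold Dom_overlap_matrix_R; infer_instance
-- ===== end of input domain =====

-- B replaces A's per-pair 4-level early-return scan by one union-of-balls set S plus
-- per-vector active-support sets, filling the matrix by pairwise support intersection.
-- Both programs build the adjacency and BFS balls identically (shared helpers below).

-- ===== PORT A =====
-- build_adj: adj = [[] for _ in range(n)]; for a,b in edges: skip self-loops, append each way if absent
def pvBuildAdj (n : Int) (edges : List (Int × Int)) : List (List Int) :=
  edges.foldl (fun adj p =>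
    if p.1 = p.2 then adj
    else
      let adj :=
        if (PySem.List.pyGetD adj p.1 []).contains p.2 then adj
        else PySem.List.pySetD adj p.1 (PySem.List.pyGetD adj p.1 [] ++ [p.2])
      if (PySem.List.pyGetD adj p.2 []).contains p.1 then adj
      else PySem.List.pySetD adj p.2 (PySem.List.pyGetD adj p.2 [] ++ [p.1]))
    (List.replicate n.toNat [])

-- one BFS round: for u in frontier: for v in adj[u]: if v not in seen: seen.add v; nxt.add v
def pvBfsStep (adj : List (List Int)) (seen frontier : PySem.Set Int) :
    PySem.Set Int × PySem.Set Int :=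
  frontier.foldl (fun sn u =>
    (PySem.List.pyGetD adj u []).foldl (fun sn v =>
      if sn.1.contains v then sn else (PySem.Set.add sn.1 v, PySem.Set.add sn.2 v)) sn)
    (seen, PySem.Set.empty)

-- for _ in range(R): … ; if not frontier: break
def pvBfsLoop (adj : List (List Int)) : Nat → PySem.Set Int → PySem.Set Int → PySem.Set Int
  | 0, seen, _ => seen
  | k+1, seen, frontier =>
    let p := pvBfsStep adj seen frontier
    if p.2.isEmpty then p.1 else pvBfsLoop adj k p.1 p.2

def pvBfsBall (adj : List (List Int)) (center : Int) (R : Int) : PySem.Set Int :=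
  pvBfsLoop adj R.toNat (PySem.Set.add PySem.Set.empty center) (PySem.Set.add PySem.Set.empty center)

def overlap_matrix_R (n : Int) (edges : List (Int × Int)) (basis : List (List Int)) (R : Int) : List (List Int) :=
  let adj := pvBuildAdj n edges
  let balls := (PySem.List.pyRange 0 n).map (fun v => pvBfsBall adj v R)
  let m : Int := basis.length
  (PySem.List.pyRange 0 m).map (fun i =>
    (PySem.List.pyRange 0 m).map (fun j =>
      let ci := PySem.List.pyGetD basis i []
      let cj := PySem.List.pyGetD basis j []
      -- overlaps(i,j): early-return double loop over v then e = any/any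
      if (PySem.List.pyRange 0 n).any (fun v =>
            let ball := PySem.List.pyGetD balls v []
            (PySem.List.enumerate edges).any (fun p =>
              PySem.List.pyGetD ci p.1 0 != 0 && PySem.List.pyGetD cj p.1 0 != 0 &&
                (PySem.Set.contains ball p.2.1 || PySem.Set.contains ball p.2.2)))
      then 1 else 0))

-- ===== PORT B =====
def overlap_matrix_R_alt (n : Int) (edges : List (Int × Int)) (basis : List (List Int)) (R : Int) : List (List Int) :=
  let adj := pvBuildAdj n edges
  -- S = union of all BFS balls
  let S := (PySem.List.pyRange 0 n).foldl
    (fun s v => PySem.Set.union s (pvBfsBall adj v R)) PySem.Set.empty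
  -- per-row active support: {e : row[e] truthy and (a in S or b in S)}
  let supports := basis.map (fun row =>
    PySem.Set.ofList (((PySem.List.enumerate edges).filter (fun p =>
      PySem.List.pyGetD row p.1 0 != 0 &&
        (PySem.Set.contains S p.2.1 || PySem.Set.contains S p.2.2))).map (·.1)))
  let m : Int := basis.length
  (PySem.List.pyRange 0 m).map (fun i =>
    (PySem.List.pyRange 0 m).map (fun j =>
      if (PySem.Set.inter (PySem.List.pyGetD supports i [])
            (PySem.List.pyGetD supports j [])).isEmpty then 0 else 1))

-- ===== PRECONDITION & SPEC =====
-- Pre_ excludes (a) edges with a non-self-loop endpoint outside [-n, n), where A's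
-- build_adj raises IndexError, and (b) basis rows shorter than edges, where A's
-- basis[i][e] read raises IndexError unless an early return or short-circuit skips it
-- (B indexes every edge of every row, so it always raises there).
def Pre_overlap_matrix_R (n : Int) (edges : List (Int × Int)) (basis : List (List Int)) (R : Int) : Prop :=
  (∀ p ∈ edges, p.1 ≠ p.2 → (-n ≤ p.1 ∧ p.1 < n ∧ -n ≤ p.2 ∧ p.2 < n)) ∧
  (∀ row ∈ basis, edges.length ≤ row.length)
instance (n : Int) (edges : List (Int × Int)) (basis : List (List Int)) (R : Int) : Decidable (Pre_overlap_matrix_R n edges basis R) := by unfold Pre_overlap_matrix_R; infer_instance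

def pvWitness_overlap_matrix_R : Int × (List (Int × Int)) × List (List Int) × Int :=
  (3, [(0, 1), (1, 2)], [[1, 0], [0, 1]], 1)

def Spec_overlap_matrix_R (n : Int) (edges : List (Int × Int)) (basis : List (List Int)) (R : Int) (out : List (List Int)) : Prop := out = overlap_matrix_R_alt n edges basis R
instance (n : Int) (edges : List (Int × Int)) (basis : List (List Int)) (R : Int) (out : List (List Int)) : Decidable (Spec_overlap_matrix_R n edges basis R out) := by unfold Spec_overlap_matrix_R; infer_instance

-- ===== CLAIM (what is proved, stated in full; the proofs are below) =====
def Claim_equal_overlap_matrix_R : Prop := ∀ (n : Int) (edges : List (Int × Int)) (basis : List (List Int)) (R : Int), Dom_overlap_matrix_R n edges basis R → Pre_overlap_matrix_R n edges basis R → Spec_overlap_matrix_R n edges basis R (overlap_matrix_R n edges basis R)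

-- ===== LEMMAS AND PROOFS =====

-- membership in B's folded union of balls
theorem pv_mem_foldl_union {l : List Int} {f : Int → PySem.Set Int} {s0 : PySem.Set Int} {x : Int} :
    x ∈ l.foldl (fun s v => PySem.Set.union s (f v)) s0 ↔ x ∈ s0 ∨ ∃ v ∈ l, x ∈ f v := by
  induction l generalizing s0 with
  | nil => simp
  | cons a t ih =>
    simp [List.foldl_cons, ih, PySem.Set.mem_union]
    tauto

-- A's "∃ center v with x in balls[v]" is "x in S"
theorem pv_mem_S (n R : Int) (edges : List (Int × Int)) (x : Int) :
    (∃ v ∈ PySem.List.pyRange 0 n, x ∈ PySem.List.pyGetD ((PySem.List.pyRange 0 n).map (fun v => pvBfsBall (pvBuildAdj n edges) v R)) v []) ↔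
    x ∈ (PySem.List.pyRange 0 n).foldl (fun s v => PySem.Set.union s (pvBfsBall (pvBuildAdj n edges) v R)) PySem.Set.empty := by
  rw [pv_mem_foldl_union]
  simp only [PySem.Set.empty, List.not_mem_nil, false_or]
  constructor
  · rintro ⟨v, hv, hx⟩
    refine ⟨v, hv, ?_⟩
    have h := PySem.List.mem_pyRange_one.mp hv
    have hn : n = ((n.toNat : Nat) : Int) := by omega
    have hv' : v = ((v.toNat : Nat) : Int) := by omega
    have hk : v.toNat < n.toNat := by omega
    rw [hn, hv', PySem.List.pyGetD_map_pyRange _ _ _ _ hk] at hx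
    rw [hn, hv']
    exact hx
  · rintro ⟨v, hv, hx⟩
    refine ⟨v, hv, ?_⟩
    have h := PySem.List.mem_pyRange_one.mp hv
    have hn : n = ((n.toNat : Nat) : Int) := by omega
    have hv' : v = ((v.toNat : Nat) : Int) := by omega
    have hk : v.toNat < n.toNat := by omega
    rw [hn, hv', PySem.List.pyGetD_map_pyRange _ _ _ _ hk]
    rw [hn, hv'] at hx
    exact hx

-- B's row-support as a predicate on edge indices
theorem pv_mem_supp (edges : List (Int × Int)) (S : PySem.Set Int) (row : List Int) (x : Int) :
    (x ∈ PySem.Set.ofList (((PySem.List.enumerate edges).filter (fun p =>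
        PySem.List.pyGetD row p.1 0 != 0 &&
          (PySem.Set.contains S p.2.1 || PySem.Set.contains S p.2.2))).map (·.1))) ↔
    ∃ (k : Nat) (_ : k < edges.length),
      x = (k : Int) ∧ PySem.List.pyGetD row (k : Int) 0 ≠ 0 ∧
      (edges[k].1 ∈ S ∨ edges[k].2 ∈ S) := by
  rw [PySem.Set.mem_ofList, List.mem_map]
  constructor
  · rintro ⟨p, hp, rfl⟩
    rw [List.mem_filter] at hp
    obtain ⟨hpmem, hpred⟩ := hp
    obtain ⟨k, hk, rfl⟩ := (PySem.List.mem_enumerate_iff edges 0 p).mp hpmem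
    simp only [Bool.and_eq_true, Bool.or_eq_true, bne_iff_ne, ne_eq,
      PySem.Set.contains_iff] at hpred
    exact ⟨k, hk, by simp, by simpa using hpred.1, by simpa using hpred.2⟩
  · rintro ⟨k, hk, rfl, ht, hm⟩
    refine ⟨((k : Int), edges[k]), ?_, rfl⟩
    rw [List.mem_filter]
    constructor
    · exact (PySem.List.mem_enumerate_iff edges 0 _).mpr ⟨k, hk, by simp⟩
    · simp only [Bool.and_eq_true, Bool.or_eq_true, bne_iff_ne, ne_eq,
        PySem.Set.contains_iff]
      exact ⟨ht, hm⟩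

-- the row-support of the empty row is empty
theorem pv_supp_nil (edges : List (Int × Int)) (S : PySem.Set Int) :
    PySem.Set.ofList (((PySem.List.enumerate edges).filter (fun p =>
        PySem.List.pyGetD ([] : List Int) p.1 0 != 0 &&
          (PySem.Set.contains S p.2.1 || PySem.Set.contains S p.2.2))).map (·.1)) = [] := by
  have h : ((PySem.List.enumerate edges).filter (fun p =>
      PySem.List.pyGetD ([] : List Int) p.1 0 != 0 &&
        (PySem.Set.contains S p.2.1 || PySem.Set.contains S p.2.2))) = [] := by
    rw [List.filter_eq_nil_iff]
    intro p _
    simp [PySem.List.pyGetD, PySem.List.pyGet?]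
  rw [h]
  rfl

-- one matrix entry of A equals the corresponding entry of B
theorem pv_entry_eq (n : Int) (edges : List (Int × Int)) (basis : List (List Int)) (R : Int)
    (i j : Int) :
    (if (PySem.List.pyRange 0 n).any (fun v =>
          (PySem.List.enumerate edges).any (fun p =>
            PySem.List.pyGetD (PySem.List.pyGetD basis i []) p.1 0 != 0 &&
            PySem.List.pyGetD (PySem.List.pyGetD basis j []) p.1 0 != 0 &&
              (PySem.Set.contains (PySem.List.pyGetD ((PySem.List.pyRange 0 n).map (fun v => pvBfsBall (pvBuildAdj n edges) v R)) v []) p.2.1 ||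
               PySem.Set.contains (PySem.List.pyGetD ((PySem.List.pyRange 0 n).map (fun v => pvBfsBall (pvBuildAdj n edges) v R)) v []) p.2.2)))
     then (1 : Int) else 0) =
    (if (PySem.Set.inter
          (PySem.List.pyGetD (basis.map (fun row =>
            PySem.Set.ofList (((PySem.List.enumerate edges).filter (fun p =>
              PySem.List.pyGetD row p.1 0 != 0 &&
                (PySem.Set.contains ((PySem.List.pyRange 0 n).foldl (fun s v => PySem.Set.union s (pvBfsBall (pvBuildAdj n edges) v R)) PySem.Set.empty) p.2.1 ||
                 PySem.Set.contains ((PySem.List.pyRange 0 n).foldl (fun s v => PySem.Set.union s (pvBfsBall (pvBuildAdj n edges) v R)) PySem.Set.empty) p.2.2))).map (·.1)))) i [])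
          (PySem.List.pyGetD (basis.map (fun row =>
            PySem.Set.ofList (((PySem.List.enumerate edges).filter (fun p =>
              PySem.List.pyGetD row p.1 0 != 0 &&
                (PySem.Set.contains ((PySem.List.pyRange 0 n).foldl (fun s v => PySem.Set.union s (pvBfsBall (pvBuildAdj n edges) v R)) PySem.Set.empty) p.2.1 ||
                 PySem.Set.contains ((PySem.List.pyRange 0 n).foldl (fun s v => PySem.Set.union s (pvBfsBall (pvBuildAdj n edges) v R)) PySem.Set.empty) p.2.2))).map (·.1)))) j [])).isEmpty
     then (0 : Int) else 1) := by
  set S := (PySem.List.pyRange 0 n).foldl (fun s v => PySem.Set.union s (pvBfsBall (pvBuildAdj n edges) v R)) PySem.Set.empty with hS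
  set f : List Int → PySem.Set Int := (fun row =>
    PySem.Set.ofList (((PySem.List.enumerate edges).filter (fun p =>
      PySem.List.pyGetD row p.1 0 != 0 &&
        (PySem.Set.contains S p.2.1 || PySem.Set.contains S p.2.2))).map (·.1))) with hf
  -- B's lookups into `supports` are the supports of A's row lookups
  have hsupp : ∀ k : Int, PySem.List.pyGetD (basis.map f) k [] = f (PySem.List.pyGetD basis k []) := by
    intro k
    have h0 : f ([] : List Int) = [] := pv_supp_nil edges S
    calc PySem.List.pyGetD (basis.map f) k [] = PySem.List.pyGetD (basis.map f) k (f []) := by rw [h0]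
    _ = f (PySem.List.pyGetD basis k []) := PySem.List.pyGetD_map f basis k []
  -- the shared existence statement
  have key : ((PySem.List.pyRange 0 n).any (fun v =>
          (PySem.List.enumerate edges).any (fun p =>
            PySem.List.pyGetD (PySem.List.pyGetD basis i []) p.1 0 != 0 &&
            PySem.List.pyGetD (PySem.List.pyGetD basis j []) p.1 0 != 0 &&
              (PySem.Set.contains (PySem.List.pyGetD ((PySem.List.pyRange 0 n).map (fun v => pvBfsBall (pvBuildAdj n edges) v R)) v []) p.2.1 ||
               PySem.Set.contains (PySem.List.pyGetD ((PySem.List.pyRange 0 n).map (fun v => pvBfsBall (pvBuildAdj n edges) v R)) v []) p.2.2))) = true) ↔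
      ¬ ((PySem.Set.inter (PySem.List.pyGetD (basis.map f) i []) (PySem.List.pyGetD (basis.map f) j [])).isEmpty = true) := by
    rw [hsupp, hsupp, Bool.not_eq_true, List.isEmpty_eq_false_iff_exists_mem, hf]
    simp only [List.any_eq_true, Bool.and_eq_true, Bool.or_eq_true, bne_iff_ne, ne_eq,
      PySem.Set.contains_iff, PySem.Set.mem_inter, pv_mem_supp]
    constructor
    · rintro ⟨v, hv, p, hp, ⟨hti, htj⟩, hm⟩
      obtain ⟨k, hk, rfl⟩ := (PySem.List.mem_enumerate_iff edges 0 p).mp hp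
      have hmS : edges[k].1 ∈ S ∨ edges[k].2 ∈ S := by
        rw [hS]
        rcases hm with hm | hm
        · exact Or.inl ((pv_mem_S n R edges _).mp ⟨v, hv, by simpa using hm⟩)
        · exact Or.inr ((pv_mem_S n R edges _).mp ⟨v, hv, by simpa using hm⟩)
      exact ⟨(k : Int), ⟨k, hk, rfl, by simpa using hti, hmS⟩, ⟨k, hk, rfl, by simpa using htj, hmS⟩⟩
    · rintro ⟨x, ⟨k, hk, rfl, hti, hmS⟩, ⟨k', hk', hkk', htj0, _⟩⟩
      have hke : (k' : Int) = (k : Int) := hkk'.symm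
      have htj : ¬ PySem.List.pyGetD (PySem.List.pyGetD basis j []) (k : Int) 0 = 0 := by
        rwa [hke] at htj0
      rw [hS] at hmS
      have : ∃ v ∈ PySem.List.pyRange 0 n,
          edges[k].1 ∈ PySem.List.pyGetD ((PySem.List.pyRange 0 n).map (fun v => pvBfsBall (pvBuildAdj n edges) v R)) v [] ∨
          edges[k].2 ∈ PySem.List.pyGetD ((PySem.List.pyRange 0 n).map (fun v => pvBfsBall (pvBuildAdj n edges) v R)) v [] := by
        rcases hmS with hmS | hmS
        · obtain ⟨v, hv, hx⟩ := (pv_mem_S n R edges _).mpr hmS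
          exact ⟨v, hv, Or.inl hx⟩
        · obtain ⟨v, hv, hx⟩ := (pv_mem_S n R edges _).mpr hmS
          exact ⟨v, hv, Or.inr hx⟩
      obtain ⟨v, hv, hm⟩ := this
      exact ⟨v, hv, ((k : Int), edges[k]),
        (PySem.List.mem_enumerate_iff edges 0 _).mpr ⟨k, hk, by simp⟩,
        ⟨by simpa using hti, by simpa using htj⟩, hm⟩
  split_ifs with h1 h2 h3
  · exact absurd h2 (key.mp h1)
  · rfl
  · rfl
  · exact absurd (key.mpr h3) h1

-- ===== VERDICT (by name: the statement is the Claim_ definition above) =====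
theorem overlap_matrix_R_spec : Claim_equal_overlap_matrix_R := by
  intro n edges basis R _ _
  unfold Spec_overlap_matrix_R overlap_matrix_R overlap_matrix_R_alt
  refine List.map_congr_left (fun i _ => List.map_congr_left (fun j _ => ?_))
  exact pv_entry_eq n edges basis R i j
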